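-- pv_equiv track=rewrite | github.com/deontmba/23002-Gideon-Tamba | Tugas 3/vigenere.py | generate_vigenere_key
-- ===== SOURCE A (Python) =====
-- def generate_vigenere_key(text, key):
--     key = list(key)
--     if len(text) == len(key):
--         return key
--     else:
--         for i in range(len(text) - len(key)):
--             key.append(key[i % len(key)])
--     return "".join(key)
-- ===== SOURCE B (Python) =====
-- def generate_vigenere_key(text, key):
--     if len(text) <= len(key):
--         return key
--     return (key * (len(text) // len(key) + 1))[:len(text)]
-- ===== Notes on version B (the rewrite author's own statement) =====
-- stated objective: simpler
-- what changed: Replaced the self-referential one-at-a-time append loop (reading from the growing list) with a closed-form construction: repeat the key ceil-many times by string multiplication and slice to len(text).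
-- outside the precondition, e.g. on generate_vigenere_key('ab', 'ab'): A returns ['a', 'b'], B returns 'ab'
import Mathlib
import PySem

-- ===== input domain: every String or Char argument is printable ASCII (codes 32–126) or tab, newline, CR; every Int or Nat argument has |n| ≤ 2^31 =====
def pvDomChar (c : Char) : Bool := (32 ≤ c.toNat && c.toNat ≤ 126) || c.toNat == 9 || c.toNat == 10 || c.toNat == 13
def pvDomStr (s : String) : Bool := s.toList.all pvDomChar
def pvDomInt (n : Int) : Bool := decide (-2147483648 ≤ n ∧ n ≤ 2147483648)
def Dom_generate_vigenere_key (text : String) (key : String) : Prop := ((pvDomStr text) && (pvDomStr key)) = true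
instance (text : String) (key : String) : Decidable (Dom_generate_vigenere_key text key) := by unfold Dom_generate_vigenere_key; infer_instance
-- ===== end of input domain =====

-- B replaces A's self-referential append loop with a closed-form "repeat key and slice" construction (objective: simpler).


-- ===== PORT A =====
-- Literal port of A.  In the equal-length branch Python returns the LIST of characters
-- (not a string); that branch is excluded by Pre_ below, here it is rendered as String.ofList.
def generate_vigenere_key (text : String) (key : String) : String :=
  let k := key.toList
  if text.toList.length == k.length then String.ofList k
  else
    String.ofList ((PySem.List.pyRange 0 ((text.toList.length : Int) - (k.length : Int)) 1).foldl
      (fun acc i => acc ++ [PySem.List.pyGetD acc (PySem.Int.mod i (acc.length : Int)) ' ']) k)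

-- ===== PORT B =====
def generate_vigenere_key_alt (text : String) (key : String) : String :=
  if text.toList.length ≤ key.toList.length then key
  else
    String.ofList (((List.replicate (text.toList.length / key.toList.length + 1) key.toList).flatten).take
      text.toList.length)

-- ===== PRECONDITION & SPEC =====
-- Pre_ excludes (a) empty key with longer text, where A raises ZeroDivisionError (B raises too), and
-- (b) len(text) == len(key), where A returns a LIST of characters rather than a string — a value
-- outside the declared return type (B returns the string there).
def Pre_generate_vigenere_key (text : String) (key : String) : Prop :=
  key.toList ≠ [] ∧ text.toList.length ≠ key.toList.length
instance (text : String) (key : String) : Decidable (Pre_generate_vigenere_key text key) := by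
  unfold Pre_generate_vigenere_key; infer_instance

def pvWitness_generate_vigenere_key : String × String := ("attackatdawn", "key")

def Spec_generate_vigenere_key (text : String) (key : String) (out : String) : Prop := out = generate_vigenere_key_alt text key
instance (text : String) (key : String) (out : String) : Decidable (Spec_generate_vigenere_key text key out) := by unfold Spec_generate_vigenere_key; infer_instance

-- ===== CLAIM (what is proved, stated in full; the proofs are below) =====
def Claim_equal_generate_vigenere_key : Prop := ∀ (text : String) (key : String), Dom_generate_vigenere_key text key → Pre_generate_vigenere_key text key → Spec_generate_vigenere_key text key (generate_vigenere_key text key)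

-- ===== LEMMAS AND PROOFS =====

-- element j of the m-fold repetition of l is l[j % l.length]
theorem flatten_replicate_getElem {α : Type} (l : List α) (m j : Nat)
    (hl : l ≠ []) (h : j < ((List.replicate m l).flatten).length) :
    ((List.replicate m l).flatten)[j] =
      l[j % l.length]'(Nat.mod_lt _ (List.length_pos_of_ne_nil hl)) := by
  induction m generalizing j with
  | zero => simp at h
  | succ m ih =>
    have hrep : (List.replicate (m+1) l).flatten = l ++ (List.replicate m l).flatten := by
      simp [List.replicate_succ]
    rw [List.getElem_of_eq hrep]
    rw [hrep] at h
    by_cases hj : j < l.length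
    · rw [List.getElem_append_left hj]
      congr 1
      exact (Nat.mod_eq_of_lt hj).symm
    · push_neg at hj
      rw [List.getElem_append_right hj]
      rw [ih (j - l.length) (by simp at h ⊢; omega)]
      congr 1
      conv_rhs => rw [show j = (j - l.length) + 1 * l.length by omega]
      rw [Nat.add_mul_mod_self_right]

theorem flatten_replicate_length {α : Type} (l : List α) (m : Nat) :
    ((List.replicate m l).flatten).length = m * l.length := by
  simp

-- the loop body of A's port
def pvStep (acc : List Char) (i : Int) : List Char :=
  acc ++ [PySem.List.pyGetD acc (PySem.Int.mod i (acc.length : Int)) ' ']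

-- invariant: after n iterations the accumulator has length k+n and is cyclic in l
theorem pvFold_inv (l : List Char) (hl : l ≠ []) (n : Nat) :
    ((PySem.List.pyRange 0 (n : Int) 1).foldl pvStep l).length = l.length + n ∧
    ∀ j (h : j < ((PySem.List.pyRange 0 (n : Int) 1).foldl pvStep l).length),
      ((PySem.List.pyRange 0 (n : Int) 1).foldl pvStep l)[j] =
        l[j % l.length]'(Nat.mod_lt _ (List.length_pos_of_ne_nil hl)) := by
  have hk : 0 < l.length := List.length_pos_of_ne_nil hl
  induction n with
  | zero =>
    rw [PySem.List.pyRange_one_eq_nil (by omega)]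
    refine ⟨by simp, ?_⟩
    intro j h
    simp only [List.foldl_nil] at h ⊢
    congr 1
    exact (Nat.mod_eq_of_lt h).symm
  | succ n ih =>
    have hsplit : PySem.List.pyRange 0 ((n : Int) + 1) 1 =
        PySem.List.pyRange 0 (n : Int) 1 ++ [(n : Int)] :=
      PySem.List.pyRange_one_succ_right (by omega)
    have hcast : (((n + 1 : Nat)) : Int) = (n : Int) + 1 := by push_cast; ring
    set F := (PySem.List.pyRange 0 (n : Int) 1).foldl pvStep l with hF
    obtain ⟨ihlen, ihget⟩ := ih
    have hstep : (PySem.List.pyRange 0 (((n + 1 : Nat)) : Int) 1).foldl pvStep l =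
        F ++ [PySem.List.pyGetD F (PySem.Int.mod (n : Int) (F.length : Int)) ' '] := by
      rw [hcast, hsplit, List.foldl_append]
      rfl
    have hnlt : n < F.length := by omega
    have hmod : PySem.Int.mod (n : Int) (F.length : Int) = (n : Int) := by
      rw [PySem.Int.mod_eq_emod_of_pos (by exact_mod_cast Nat.lt_of_lt_of_le hk (by omega))]
      exact Int.emod_eq_of_lt (by omega) (by exact_mod_cast hnlt)
    have hget : PySem.List.pyGetD F (PySem.Int.mod (n : Int) (F.length : Int)) ' ' =
        l[n % l.length]'(Nat.mod_lt _ hk) := by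
      rw [hmod, PySem.List.pyGetD_natCast, List.getD_eq_getElem _ _ hnlt, ihget n hnlt]
    constructor
    · rw [hstep]; simp; omega
    · intro j h
      rw [List.getElem_of_eq hstep]
      rw [hstep] at h
      by_cases hj : j < F.length
      · rw [List.getElem_append_left hj]; exact ihget j hj
      · have hjeq : j = F.length := by simp at h; omega
        subst hjeq
        rw [List.getElem_append_right (le_refl _)]
        simp only [Nat.sub_self, List.getElem_cons_zero, hget]
        congr 1
        rw [ihlen, show l.length + n = n + 1 * l.length by omega, Nat.add_mul_mod_self_right]

-- ===== VERDICT (by name: the statement is the Claim_ definition above) =====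
theorem generate_vigenere_key_spec : Claim_equal_generate_vigenere_key := by
  intro text key _ hpre
  obtain ⟨hk, hne⟩ := hpre
  unfold Spec_generate_vigenere_key generate_vigenere_key generate_vigenere_key_alt
  set t := text.toList with ht
  set l := key.toList with hlk
  have hkpos : 0 < l.length := List.length_pos_of_ne_nil hk
  simp only []
  rw [if_neg (by simpa using hne)]
  by_cases hlt : t.length ≤ l.length
  · -- text shorter: A's loop range is empty, B returns key
    rw [if_pos hlt]
    rw [PySem.List.pyRange_one_eq_nil (by omega : (t.length : Int) - (l.length : Int) ≤ 0)]
    simp only [List.foldl_nil, hlk]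
    exact String.ofList_toList
  · -- text longer: both sides are the cyclic extension of l to length t.length
    push_neg at hlt
    rw [if_neg (by omega)]
    set n := t.length - l.length with hn
    have hcast : (t.length : Int) - (l.length : Int) = (n : Int) := by omega
    rw [hcast]
    obtain ⟨hlen, hget⟩ := pvFold_inv l hk n
    have hA : ((PySem.List.pyRange 0 (n : Int) 1).foldl
        (fun acc i => acc ++ [PySem.List.pyGetD acc (PySem.Int.mod i (acc.length : Int)) ' ']) l)
        = (PySem.List.pyRange 0 (n : Int) 1).foldl pvStep l := rfl
    rw [hA]
    congr 1
    set m := t.length / l.length + 1 with hm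
    have hTm : t.length < m * l.length := by
      have h1 : t.length % l.length < l.length := Nat.mod_lt _ hkpos
      have h2 : l.length * (t.length / l.length) + t.length % l.length = t.length :=
        Nat.div_add_mod _ _
      have h3 : m * l.length = l.length * (t.length / l.length) + l.length := by rw [hm]; ring
      omega
    apply List.ext_getElem
    · rw [hlen, List.length_take, flatten_replicate_length]
      omega
    · intro j h1 h2
      rw [hget j h1, List.getElem_take, flatten_replicate_getElem l m j hk
        (by rw [flatten_replicate_length]; rw [List.length_take, flatten_replicate_length] at h2; omega)]
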